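-- pv_equiv track=rewrite | github.com/docToolchain/aoc-2020 | day06/python/fallshare/solution.py | solution_star2
-- ===== SOURCE A (Python) =====
-- def solution_star2(groups):
--     totalCount = 0
--
--     for group in groups:
--         intersection_set = group[0]
--         for passenger in group:
--             intersection_set = intersection_set.intersection(passenger)
--
--         totalCount += len(intersection_set)
--     return totalCount
-- ===== SOURCE B (Python) =====
-- def solution_star2(groups):
--     total = 0
--     for group in groups:
--         counts = {}
--         for passenger in group:
--             for answer in passenger:
--                 counts[answer] = counts.get(answer, 0) + 1
--         n = len(group)
--         total += sum(1 for c in counts.values() if c == n)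
--     return total
-- ===== Notes on version B (the rewrite author's own statement) =====
-- stated objective: alternative
-- what changed: Replaces the per-group progressive set intersection with a frequency dictionary built over all passengers, counting the answers whose frequency equals the group size.
-- outside the precondition, e.g. on solution_star2([[]]): A raises IndexError, B returns 0
import Mathlib
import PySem

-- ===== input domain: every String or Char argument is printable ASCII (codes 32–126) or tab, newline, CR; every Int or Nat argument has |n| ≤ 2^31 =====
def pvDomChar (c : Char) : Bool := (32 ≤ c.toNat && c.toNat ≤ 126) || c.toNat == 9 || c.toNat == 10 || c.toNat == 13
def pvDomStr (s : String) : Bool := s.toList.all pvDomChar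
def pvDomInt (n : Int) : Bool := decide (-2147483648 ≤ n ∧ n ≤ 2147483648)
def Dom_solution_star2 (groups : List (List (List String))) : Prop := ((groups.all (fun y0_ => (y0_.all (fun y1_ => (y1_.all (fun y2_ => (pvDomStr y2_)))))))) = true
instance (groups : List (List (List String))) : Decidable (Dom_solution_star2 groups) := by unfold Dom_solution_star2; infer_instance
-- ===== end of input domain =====

-- B replaces A's progressive set-intersection per group by a frequency dictionary
-- compared against the group size (objective: alternative, idiomatic counting style).
-- Each passenger is a Python set, modelled as a list of its distinct elements.

-- ===== PORT A =====
def solution_star2 (groups : List (List (List String))) : Int :=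
  groups.foldl
    (fun totalCount group =>
      -- intersection_set = group[0]; for passenger in group: intersection_set = intersection_set.intersection(passenger)
      let intersectionSet : PySem.Set String :=
        group.foldl (fun s passenger => PySem.Set.inter s passenger)
          (PySem.Set.ofList (PySem.List.pyGetD group 0 []))
      totalCount + PySem.Set.len intersectionSet)
    0

-- ===== PORT B =====
def solution_star2_alt (groups : List (List (List String))) : Int :=
  groups.foldl
    (fun total group =>
      let counts : PySem.Dict String Int :=
        group.foldl
          (fun d passenger =>
            (PySem.Set.ofList passenger).foldl
              (fun d answer => d.insert answer (d.getD answer 0 + 1)) d)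
          PySem.Dict.empty
      let n : Int := group.length
      total + counts.values.foldl (fun acc c => if c == n then acc + 1 else acc) 0)
    0

-- ===== PRECONDITION & SPEC =====
-- Pre_ excludes inputs containing an empty group, on which A raises IndexError at group[0].
def Pre_solution_star2 (groups : List (List (List String))) : Prop :=
  ∀ g ∈ groups, g ≠ []
instance (groups : List (List (List String))) : Decidable (Pre_solution_star2 groups) := by
  unfold Pre_solution_star2; infer_instance
def pvWitness_solution_star2 : List (List (List String)) := [[["a"], ["a", "b"]], [["x"]]]

def Spec_solution_star2 (groups : List (List (List String))) (out : Int) : Prop := out = solution_star2_alt groups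
instance (groups : List (List (List String))) (out : Int) : Decidable (Spec_solution_star2 groups out) := by unfold Spec_solution_star2; infer_instance

-- ===== CLAIM (what is proved, stated in full; the proofs are below) =====
def Claim_equal_solution_star2 : Prop := ∀ (groups : List (List (List String))), Dom_solution_star2 groups → Pre_solution_star2 groups → Spec_solution_star2 groups (solution_star2 groups)

-- ===== LEMMAS AND PROOFS =====

-- A's progressive intersection is a filter by membership in every passenger.
lemma foldl_inter_eq_filter (gs : List (List String)) (s : List String) :
    gs.foldl (fun s p => PySem.Set.inter s p) s
      = s.filter (fun x => gs.all (fun p => p.contains x)) := by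
  induction gs generalizing s with
  | nil => simp
  | cons p ps ih =>
    rw [List.foldl_cons, ih]
    simp only [PySem.Set.inter, PySem.Set.contains, List.filter_filter, List.all_cons]
    apply List.filter_congr
    intro x _
    simp [Bool.and_comm]

-- the count of x in the concatenated dedup'd passengers counts the passengers containing x
lemma count_flat (group : List (List String)) (x : String) :
    (group.flatMap (fun p => PySem.Set.ofList p)).count x
      = group.countP (fun p => p.contains x) := by
  induction group with
  | nil => simp
  | cons p ps ih =>
    simp only [List.flatMap_cons, List.count_append, ih, List.countP_cons]
    have hc : (PySem.Set.ofList p).count x = if p.contains x then 1 else 0 := by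
      rw [List.Nodup.count (PySem.Set.nodup_ofList p)]
      simp [PySem.Set.mem_ofList]
    rw [hc]
    split_ifs <;> simp_all
    omega

-- "count equals group size" is exactly "present in every passenger"
lemma count_eq_len_iff_all (g0 : List String) (rest : List (List String)) (x : String) :
    (((((g0 :: rest).flatMap (fun p => PySem.Set.ofList p)).count x : Int))
        == ((g0 :: rest).length : Int))
      = (g0 :: rest).all (fun p => p.contains x) := by
  rw [Bool.eq_iff_iff]
  simp only [beq_iff_eq, Nat.cast_inj, count_flat, List.all_eq_true, List.countP_eq_length]

-- counting a predicate implying membership in g0 over the union or over g0 alone agree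
lemma countP_union_eq_countP_head (g0 : List String) (rest : List (List String))
    (R : String → Bool) (hR : ∀ x, R x = true → x ∈ g0) :
    List.countP R (PySem.Set.ofList ((g0 :: rest).flatMap (fun p => PySem.Set.ofList p)))
      = List.countP R (PySem.Set.ofList g0) := by
  rw [List.countP_eq_length_filter, List.countP_eq_length_filter]
  apply List.Perm.length_eq
  rw [List.perm_ext_iff_of_nodup ((PySem.Set.nodup_ofList _).filter R)
        ((PySem.Set.nodup_ofList _).filter R)]
  intro a
  simp only [List.mem_filter, PySem.Set.mem_ofList, List.mem_flatMap]
  constructor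
  · rintro ⟨_, hr⟩; exact ⟨hR a hr, hr⟩
  · rintro ⟨_, hr⟩; exact ⟨⟨g0, List.mem_cons_self, hR a hr⟩, hr⟩

-- per-group contributions agree
lemma contrib_eq (group : List (List String)) (h : group ≠ []) :
    PySem.Set.len
        (group.foldl (fun s p => PySem.Set.inter s p)
          (PySem.Set.ofList (PySem.List.pyGetD group 0 [])))
      = (PySem.Dict.values
            (group.foldl
              (fun d passenger =>
                (PySem.Set.ofList passenger).foldl
                  (fun d answer => d.insert answer (d.getD answer 0 + 1)) d)
              PySem.Dict.empty)).foldl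
          (fun acc c => if c == (group.length : Int) then acc + 1 else acc) 0 := by
  obtain ⟨g0, rest, rfl⟩ : ∃ g0 rest, group = g0 :: rest := by
    cases group with
    | nil => exact absurd rfl h
    | cons a l => exact ⟨a, l, rfl⟩
  -- B side: the nested loop is Counter of the concatenated passengers
  rw [show (g0 :: rest).foldl
        (fun d passenger =>
          (PySem.Set.ofList passenger).foldl
            (fun d answer => d.insert answer (d.getD answer 0 + 1)) d)
        PySem.Dict.empty
      = PySem.Dict.counter ((g0 :: rest).flatMap (fun p => PySem.Set.ofList p)) from by
    rw [← PySem.Dict.foldl_insert_getD_add_one_eq_counter, ← List.foldl_flatMap]]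
  rw [PySem.List.foldl_count_if]
  simp only [PySem.Dict.values, PySem.Dict.items_counter, List.map_map, List.countP_map]
  rw [zero_add]
  -- A side: the intersection loop is a filter of the first passenger
  have hA0 : PySem.List.pyGetD (g0 :: rest) 0 [] = g0 := by simp [pysem]
  rw [hA0, foldl_inter_eq_filter]
  rw [show (List.countP
        ((fun c => c == ((g0 :: rest).length : Int)) ∘ (fun x => x.2) ∘
          fun k => (k, (List.count k ((g0 :: rest).flatMap (fun p => PySem.Set.ofList p)) : Int)))
        (PySem.Set.ofList ((g0 :: rest).flatMap (fun p => PySem.Set.ofList p))))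
      = List.countP (fun x => (g0 :: rest).all (fun p => p.contains x))
          (PySem.Set.ofList ((g0 :: rest).flatMap (fun p => PySem.Set.ofList p))) from by
    apply List.countP_congr
    intro x _
    rw [show ((fun c => c == ((g0 :: rest).length : Int)) ∘ (fun x => x.2) ∘
          fun k => (k, (List.count k ((g0 :: rest).flatMap (fun p => PySem.Set.ofList p)) : Int))) x
        = (((List.count x ((g0 :: rest).flatMap (fun p => PySem.Set.ofList p)) : Int)) == ((g0 :: rest).length : Int)) from rfl]
    rw [count_eq_len_iff_all g0 rest x]]
  rw [countP_union_eq_countP_head g0 rest _ (fun x hx => by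
    simp only [List.all_cons, Bool.and_eq_true, List.contains_iff_mem] at hx
    exact hx.1)]
  simp [PySem.Set.len, List.countP_eq_length_filter]

-- ===== VERDICT (by name: the statement is the Claim_ definition above) =====
theorem solution_star2_spec : Claim_equal_solution_star2 := by
  intro groups _ hpre
  unfold Spec_solution_star2 solution_star2 solution_star2_alt
  apply PySem.List.foldl_congr_mem
  intro acc group hg
  have h := hpre group hg
  simp only []
  rw [contrib_eq group h]
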